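-- pv_equiv track=rewrite | github.com/LautaroCenteno/int-prog | segundo bimestre/clase_9_6.py | diag_principal_v1
-- ===== SOURCE A (Python) =====
-- def diag_principal_v1(m: list[list[int]]) -> list[int]:
--     res: list[int] = []                 #
--     n: int = len(m)                     # T_len(m)
--     i: int = 0                          # 1
--     while i < n:                        # n + 1     OE (entro n veces)
--         j: int = 0                      # n * 1
--         while j < n:                    # n * (n+1)     OE (entro n veces)
--             if i == j:                  # n * n
--                 res.append(m[i][j])     # T_append * n²
--             j = j + 1                   # n²
--         i = i + 1
--     return res
-- ===== SOURCE B (Python) =====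
-- def diag_principal_v1(m: list[list[int]]) -> list[int]:
--     return [row[i] for i, row in enumerate(m)]
-- ===== Notes on version B (the rewrite author's own statement) =====
-- stated objective: faster
-- what changed: Replaced the nested while-loops that scan all n^2 index pairs (appending only when i == j) by a single enumerate pass that directly takes row[i] from each row.
import Mathlib
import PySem

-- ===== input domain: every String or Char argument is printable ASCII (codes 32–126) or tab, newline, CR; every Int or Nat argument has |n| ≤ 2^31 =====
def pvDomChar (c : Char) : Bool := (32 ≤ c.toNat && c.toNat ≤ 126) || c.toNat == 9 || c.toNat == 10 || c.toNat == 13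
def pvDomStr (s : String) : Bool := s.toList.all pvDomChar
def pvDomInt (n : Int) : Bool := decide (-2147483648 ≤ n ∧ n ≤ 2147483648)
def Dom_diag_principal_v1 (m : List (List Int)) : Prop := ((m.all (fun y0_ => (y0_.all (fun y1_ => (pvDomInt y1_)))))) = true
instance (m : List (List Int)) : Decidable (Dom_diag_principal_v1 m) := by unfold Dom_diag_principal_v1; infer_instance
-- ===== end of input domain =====

-- B replaces A's nested while-loops over all n^2 index pairs by a single enumerate pass taking row[i] from each row (O(n) instead of O(n^2)).

-- ===== PORT A =====
-- literal transliteration of the two while loops: outer i over range(n), inner j over range(n),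
-- append m[i][j] when i == j (indexing via pyGetD; Pre_ guarantees every m[i][i] is in range)
def diag_principal_v1 (m : List (List Int)) : List Int :=
  let n : Int := m.length
  (PySem.List.pyRange 0 n 1).foldl (fun res i =>
    (PySem.List.pyRange 0 n 1).foldl (fun res j =>
      if i = j then res ++ [PySem.List.pyGetD (PySem.List.pyGetD m i []) j 0] else res) res) []

-- ===== PORT B =====
-- [row[i] for i, row in enumerate(m)]
def diag_principal_v1_alt (m : List (List Int)) : List Int :=
  (PySem.List.enumerate m).map (fun p => PySem.List.pyGetD p.2 p.1 0)

-- ===== PRECONDITION & SPEC =====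
-- Both Pythons raise IndexError exactly when some row k (k < len(m)) has length ≤ k; Pre_ excludes those inputs.
def Pre_diag_principal_v1 (m : List (List Int)) : Prop :=
  ∀ k : Nat, k < m.length → k < (m.getD k []).length
instance (m : List (List Int)) : Decidable (Pre_diag_principal_v1 m) := by
  unfold Pre_diag_principal_v1; infer_instance
def pvWitness_diag_principal_v1 : List (List Int) := [[1, 2], [3, 4]]

def Spec_diag_principal_v1 (m : List (List Int)) (out : List Int) : Prop := out = diag_principal_v1_alt m
instance (m : List (List Int)) (out : List Int) : Decidable (Spec_diag_principal_v1 m out) := by unfold Spec_diag_principal_v1; infer_instance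

-- ===== CLAIM (what is proved, stated in full; the proofs are below) =====
def Claim_equal_diag_principal_v1 : Prop := ∀ (m : List (List Int)), Dom_diag_principal_v1 m → Pre_diag_principal_v1 m → Spec_diag_principal_v1 m (diag_principal_v1 m)

-- ===== LEMMAS AND PROOFS =====

-- the inner loop is the identity on a range that never contains i
theorem pv_inner_skip (m : List (List Int)) (i : Int) (l : List Int) (res : List Int)
    (h : ∀ j ∈ l, j ≠ i) :
    l.foldl (fun res j =>
      if i = j then res ++ [PySem.List.pyGetD (PySem.List.pyGetD m i []) j 0] else res) res = res := by
  induction l generalizing res with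
  | nil => rfl
  | cons x xs ih =>
    simp only [List.foldl_cons]
    rw [if_neg (fun e => h x (by simp) (e.symm)), ih _ (fun j hj => h j (by simp [hj]))]

-- the inner loop over range(0, n) appends exactly m[i][i] when 0 ≤ i < n
theorem pv_inner (m : List (List Int)) (n i : Int) (res : List Int) (h0 : 0 ≤ i) (h1 : i < n) :
    (PySem.List.pyRange 0 n 1).foldl (fun res j =>
      if i = j then res ++ [PySem.List.pyGetD (PySem.List.pyGetD m i []) j 0] else res) res
      = res ++ [PySem.List.pyGetD (PySem.List.pyGetD m i []) i 0] := by
  rw [PySem.List.pyRange_one_append 0 i n h0 (le_of_lt h1), List.foldl_append,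
      PySem.List.pyRange_one_cons h1, List.foldl_cons, if_pos rfl,
      pv_inner_skip m i _ _ (fun j hj => by
        have := (PySem.List.mem_pyRange_one).1 hj; omega),
      pv_inner_skip m i _ _ (fun j hj => by
        have := (PySem.List.mem_pyRange_one).1 hj; omega)]

-- the outer fold accumulates m[i][i] for each i of the list, provided all indices are in range
theorem pv_outer_fold (m : List (List Int)) (l : List Int) (res : List Int)
    (hmem : ∀ i ∈ l, 0 ≤ i ∧ i < (m.length : Int)) :
    l.foldl (fun res i =>
      (PySem.List.pyRange 0 (m.length : Int) 1).foldl (fun res j =>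
        if i = j then res ++ [PySem.List.pyGetD (PySem.List.pyGetD m i []) j 0] else res) res) res
      = res ++ l.map (fun i => PySem.List.pyGetD (PySem.List.pyGetD m i []) i 0) := by
  induction l generalizing res with
  | nil => simp
  | cons x xs ih =>
    simp only [List.foldl_cons, List.map_cons]
    rw [pv_inner m _ x res (hmem x (by simp)).1 (hmem x (by simp)).2,
        ih _ (fun i hi => hmem i (by simp [hi]))]
    simp

-- the outer loop therefore maps i ↦ m[i][i] over range(0, n)
theorem pv_outer (m : List (List Int)) :
    diag_principal_v1 m
      = (PySem.List.pyRange 0 (m.length : Int) 1).map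
          (fun i => PySem.List.pyGetD (PySem.List.pyGetD m i []) i 0) := by
  unfold diag_principal_v1
  rw [pv_outer_fold m _ [] (fun i hi => (PySem.List.mem_pyRange_one).1 hi)]
  simp

-- ===== VERDICT (by name: the statement is the Claim_ definition above) =====
theorem diag_principal_v1_spec : Claim_equal_diag_principal_v1 := by
  intro m _ _
  unfold Spec_diag_principal_v1 diag_principal_v1_alt
  rw [pv_outer, PySem.List.enumerate_eq_map_pyRange (d := []), List.map_map]
  rfl
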